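-- pv_equiv track=rewrite | github.com/cicquoccuong/CIC-Daily-Report | src/cic_daily_report/generators/text_utils.py | truncate_to_limit
-- ===== SOURCE A (Python) =====
-- def truncate_to_limit(
--     text: str,
--     max_chars: int,
--     preserve: str = "paragraph",
-- ) -> tuple[str, bool]:
--     """Truncate text to max_chars, respecting paragraph or sentence boundaries.
--
--     Truncation strategy (in order of preference):
--     1. If text fits → return unchanged
--     2. preserve="paragraph" → cut at last paragraph break (\\n\\n) before limit
--     3. Sentence boundary → cut at last `. ` or `.\\n` or `.` at end before limit
--     4. Hard cut at max_chars (last resort)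
--
--     Args:
--         text: The text to truncate.
--         max_chars: Maximum allowed character count.
--         preserve: Boundary type — "paragraph" tries \\n\\n first then sentence,
--                   "sentence" skips paragraph search and goes straight to sentence.
--
--     Returns:
--         Tuple of (possibly truncated text, whether truncation occurred).
--     """
--     if len(text) <= max_chars:
--         return (text, False)
--
--     search_region = text[:max_chars]
--
--     # WHY paragraph-first: cleaner visual break for Telegram messages
--     if preserve == "paragraph":
--         para_idx = search_region.rfind("\n\n")
--         if para_idx > 0:
--             return (search_region[:para_idx].rstrip(), True)
--
--     # Sentence boundary: find last sentence-ending punctuation (. ! ?) followed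
--     # by space/newline, or at the exact end of the search region.
--     # WHY all three punctuation marks: `. ` only misses `! ` and `? ` boundaries,
--     # causing truncation to cut mid-paragraph after exclamatory/question sentences.
--     best_sentence_idx = -1
--     for pattern in [". ", ".\n", "! ", "!\n", "? ", "?\n"]:
--         pos = search_region.rfind(pattern)
--         if pos > best_sentence_idx:
--             best_sentence_idx = pos
--     # Also check if the search region ends exactly on a sentence-ending character
--     if max_chars - 1 > best_sentence_idx and search_region[-1:] in ".!?":
--         best_sentence_idx = max_chars - 1
--
--     # BUG-09: Changed > 0 to >= 0 to handle boundary at position 0.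
--     # Guard: don't return just a punctuation mark (len <= 1).
--     if best_sentence_idx >= 0:
--         result = search_region[: best_sentence_idx + 1].rstrip()
--         if len(result) > 1:
--             return (result, True)
--
--     # Hard cut — no boundary found (e.g., one giant word block)
--     return (search_region.rstrip(), True)
-- ===== SOURCE B (Python) =====
-- def truncate_to_limit(
--     text: str,
--     max_chars: int,
--     preserve: str = "paragraph",
-- ) -> tuple[str, bool]:
--     """Truncate text to max_chars at a paragraph or sentence boundary.
--
--     Same contract as the original, but the sentence boundary is found by a
--     single backward scan over the truncated region instead of six rfind
--     passes plus a separate end-of-region check.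
--     """
--     if len(text) <= max_chars:
--         return (text, False)
--
--     region = text[:max_chars]
--     n = len(region)
--
--     if preserve == "paragraph":
--         para_idx = region.rfind("\n\n")
--         if para_idx > 0:
--             return (region[:para_idx].rstrip(), True)
--
--     # One backward scan: position i ends a sentence if it holds '.', '!' or '?'
--     # and is either exactly at the character limit or followed by a space/newline.
--     for i in range(n - 1, -1, -1):
--         if region[i] in ".!?" and (i + 1 == max_chars or (i + 1 < n and region[i + 1] in " \n")):
--             result = region[: i + 1].rstrip()
--             if len(result) > 1:
--                 return (result, True)
--             break
--
--     return (region.rstrip(), True)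
-- ===== Notes on version B (the rewrite author's own statement) =====
-- stated objective: simpler
-- what changed: A's six-pattern rfind loop plus its separate end-of-region check are replaced by one backward scan over the truncated region that stops at the first (rightmost) sentence boundary.
import Mathlib
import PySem

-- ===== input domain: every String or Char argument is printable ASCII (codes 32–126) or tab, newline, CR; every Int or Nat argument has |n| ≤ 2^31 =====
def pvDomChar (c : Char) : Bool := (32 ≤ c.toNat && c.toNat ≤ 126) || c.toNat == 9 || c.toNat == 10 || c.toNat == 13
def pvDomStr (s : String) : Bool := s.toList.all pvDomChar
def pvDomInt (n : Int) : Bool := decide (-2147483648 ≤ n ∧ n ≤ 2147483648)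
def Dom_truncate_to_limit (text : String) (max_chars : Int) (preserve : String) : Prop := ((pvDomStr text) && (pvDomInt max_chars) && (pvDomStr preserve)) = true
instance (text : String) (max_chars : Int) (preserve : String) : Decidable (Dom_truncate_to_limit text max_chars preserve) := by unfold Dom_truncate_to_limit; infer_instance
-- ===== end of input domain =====

-- B replaces A's six-pattern rfind loop plus separate end-of-region check by one backward
-- scan with an early break (objective: simpler decomposition; same asymptotic cost).

-- ===== PORT A =====
-- A's sentence-boundary search + hard-cut tail (the code after the paragraph branch), literal.
def pvSentA (region : List Char) (max_chars : Int) : String × Bool :=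
  -- best_sentence_idx = -1; for pattern in [". ", ".\n", "! ", "!\n", "? ", "?\n"]: ...
  let best :=
    [['.', ' '], ['.', '\n'], ['!', ' '], ['!', '\n'], ['?', ' '], ['?', '\n']].foldl
      (fun b p => let pos := PySem.Chars.rfind region p; if pos > b then pos else b) (-1)
  -- if max_chars - 1 > best_sentence_idx and search_region[-1:] in ".!?": ...
  let best :=
    if max_chars - 1 > best ∧
        PySem.Chars.isIn (PySem.List.slice region (some (-1)) none) ['.', '!', '?'] = true
    then max_chars - 1 else best
  if best ≥ 0 then
    let result := PySem.Chars.rstrip (PySem.List.slice region none (some (best + 1)))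
    if (result.length : Int) > 1 then (String.ofList result, true)
    else (String.ofList (PySem.Chars.rstrip region), true)
  else (String.ofList (PySem.Chars.rstrip region), true)

def truncate_to_limit (text : String) (max_chars : Int) (preserve : String) : String × Bool :=
  let t := text.toList
  if (t.length : Int) ≤ max_chars then (text, false)
  else
    let region := PySem.List.slice t none (some max_chars)
    if preserve = "paragraph" then
      let para_idx := PySem.Chars.rfind region ['\n', '\n']
      if para_idx > 0 then
        (String.ofList (PySem.Chars.rstrip (PySem.List.slice region none (some para_idx))), true)
      else pvSentA region max_chars
    else pvSentA region max_chars

-- ===== PORT B =====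
def pvIsTerm (c : Char) : Bool := c == '.' || c == '!' || c == '?'
def pvIsSep (c : Char) : Bool := c == ' ' || c == '\n'

-- position i ends a sentence: '.', '!' or '?' at the character limit or followed by space/newline
def pvBoundary (region : List Char) (max_chars : Int) (i : Nat) : Bool :=
  pvIsTerm (region.getD i ' ') &&
    ((i : Int) + 1 == max_chars || (decide (i + 1 < region.length) && pvIsSep (region.getD (i + 1) ' ')))

-- for i in range(n - 1, -1, -1): ... break at the first boundary (k = number of indices left to try)
def pvBScan (region : List Char) (max_chars : Int) : Nat → Option Nat
  | 0 => none
  | k + 1 => if pvBoundary region max_chars k then some k else pvBScan region max_chars k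

def pvSentB (region : List Char) (max_chars : Int) : String × Bool :=
  match pvBScan region max_chars region.length with
  | some i =>
    let result := PySem.Chars.rstrip (region.take (i + 1))
    if 1 < result.length then (String.ofList result, true)
    else (String.ofList (PySem.Chars.rstrip region), true)
  | none => (String.ofList (PySem.Chars.rstrip region), true)

def truncate_to_limit_alt (text : String) (max_chars : Int) (preserve : String) : String × Bool :=
  let t := text.toList
  if (t.length : Int) ≤ max_chars then (text, false)
  else
    let region := PySem.List.slice t none (some max_chars)
    if preserve = "paragraph" then
      let para_idx := PySem.Chars.rfind region ['\n', '\n']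
      if para_idx > 0 then
        (String.ofList (PySem.Chars.rstrip (region.take para_idx.toNat)), true)
      else pvSentB region max_chars
    else pvSentB region max_chars

-- ===== PRECONDITION & SPEC =====
def Spec_truncate_to_limit (text : String) (max_chars : Int) (preserve : String) (out : String × Bool) : Prop := out = truncate_to_limit_alt text max_chars preserve
instance (text : String) (max_chars : Int) (preserve : String) (out : String × Bool) : Decidable (Spec_truncate_to_limit text max_chars preserve out) := by unfold Spec_truncate_to_limit; infer_instance

-- ===== CLAIM (what is proved, stated in full; the proofs are below) =====
def Claim_equal_truncate_to_limit : Prop := ∀ (text : String) (max_chars : Int) (preserve : String), Dom_truncate_to_limit text max_chars preserve → Spec_truncate_to_limit text max_chars preserve (truncate_to_limit text max_chars preserve)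

-- ===== LEMMAS AND PROOFS =====

def pvScan (P : Nat → Bool) : Nat → Option Nat
  | 0 => none
  | k + 1 => if P k then some k else pvScan P k

def pvOptInt : Option Nat → Int
  | none => -1
  | some j => (j : Int)

theorem pvOptInt_ge (o : Option Nat) : -1 ≤ pvOptInt o := by
  cases o <;> simp [pvOptInt]

theorem pvScan_lt {P : Nat → Bool} {k j : Nat} (h : pvScan P k = some j) : j < k := by
  induction k with
  | zero => simp [pvScan] at h
  | succ k ih =>
    simp [pvScan] at h
    split at h
    · cases h; omega
    · exact Nat.lt_succ_of_lt (ih h)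

theorem pvOptInt_scan_lt (P : Nat → Bool) (k : Nat) : pvOptInt (pvScan P k) < (k : Int) + 1 := by
  cases h : pvScan P k
  · simp [pvOptInt]
  · have := pvScan_lt h; simp [pvOptInt]; omega

theorem pvScan_some (P : Nat → Bool) {k j : Nat} (h : pvScan P k = some j) : P j = true := by
  induction k with
  | zero => simp [pvScan] at h
  | succ k ih =>
    simp [pvScan] at h
    split at h
    · cases h; assumption
    · exact ih h

theorem pvScan_or (P Q : Nat → Bool) (k : Nat) :
    pvOptInt (pvScan (fun j => P j || Q j) k) = max (pvOptInt (pvScan P k)) (pvOptInt (pvScan Q k)) := by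
  induction k with
  | zero => simp [pvScan]
  | succ k ih =>
    have hpk := pvOptInt_scan_lt P k
    have hqk := pvOptInt_scan_lt Q k
    by_cases hP : P k = true <;> by_cases hQ : Q k = true <;>
      simp only [pvScan, hP, hQ, Bool.or_true, Bool.or_false, if_true] <;>
      simp_all [pvOptInt]

theorem pvRfind_go (s sub : List Char) (k : Nat) :
    PySem.Chars.rfind.go s sub k = pvOptInt (pvScan (fun j => sub.isPrefixOf (s.drop j)) (k + 1)) := by
  induction k with
  | zero => simp [PySem.Chars.rfind.go, pvScan, pvOptInt]; split <;> simp
  | succ k ih =>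
    rw [PySem.Chars.rfind.go]
    split
    · simp_all [pvScan, pvOptInt]
    · have h2 : pvScan (fun j => sub.isPrefixOf (s.drop j)) (k + 2) =
          pvScan (fun j => sub.isPrefixOf (s.drop j)) (k + 1) := by
        simp [pvScan]; intro h; simp_all
      rw [show k + 1 + 1 = k + 2 from rfl, h2, ih]

theorem pvRfind_eq (s sub : List Char) :
    PySem.Chars.rfind s sub = pvOptInt (pvScan (fun j => sub.isPrefixOf (s.drop j)) (s.length + 1)) := by
  rw [PySem.Chars.rfind]; exact pvRfind_go s sub s.length

theorem pvPairPrefix (c d : Char) (l : List Char) (j : Nat) :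
    List.isPrefixOf [c, d] (l.drop j) =
      (decide (j + 1 < l.length) && (l.getD j ' ' == c) && (l.getD (j + 1) ' ' == d)) := by
  by_cases h : j + 1 < l.length
  · have h0 : j < l.length := by omega
    rw [List.drop_eq_getElem_cons h0]
    rw [List.drop_eq_getElem_cons h]
    simp [List.isPrefixOf, h0, h, BEq.comm]
  · have : (l.drop j).length ≤ 1 := by simp; omega
    rcases hd : l.drop j with _ | ⟨x, _ | ⟨y, t⟩⟩ <;> simp_all [List.isPrefixOf]

theorem pvBoolTaut6 (B a b c s t : Bool) :
    ((((((B && a && s) || (B && a && t)) || (B && b && s)) || (B && b && t)) || (B && c && s)) || (B && c && t))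
      = (B && (a || b || c) && (s || t)) := by
  cases B <;> cases a <;> cases b <;> cases c <;> cases s <;> cases t <;> rfl

theorem pvSingletonIn (x : Char) :
    PySem.Chars.isIn [x] ['.', '!', '?'] = pvIsTerm x := by
  rcases h : pvIsTerm x with _ | _
  · simp only [pvIsTerm] at h
    rw [Bool.eq_false_iff, Ne, PySem.Chars.isIn_iff_infix, List.singleton_infix_iff]
    simp_all
  · simp only [pvIsTerm] at h
    rw [PySem.Chars.isIn_iff_infix, List.singleton_infix_iff]
    simp_all [or_assoc]

theorem pvIfMax (a b : Int) : (if a < b then b else a) = max a b := by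
  rcases max_cases a b with ⟨h1, h2⟩ | ⟨h1, h2⟩ <;> split <;> omega

theorem pvScan_congr {P Q : Nat → Bool} (k : Nat) (h : ∀ i, i < k → P i = Q i) :
    pvScan P k = pvScan Q k := by
  induction k with
  | zero => rfl
  | succ k ih =>
    simp only [pvScan, h k (by omega)]
    rw [ih (fun i hi => h i (by omega))]

def pvQA (l : List Char) (j : Nat) : Bool :=
  decide (j + 1 < l.length) && pvIsTerm (l.getD j ' ') && pvIsSep (l.getD (j + 1) ' ')

theorem pvFoldBest (l : List Char) :
    [['.', ' '], ['.', '\n'], ['!', ' '], ['!', '\n'], ['?', ' '], ['?', '\n']].foldl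
      (fun b p => let pos := PySem.Chars.rfind l p; if pos > b then pos else b) (-1)
      = pvOptInt (pvScan (pvQA l) (l.length + 1)) := by
  simp only [List.foldl, gt_iff_lt, pvIfMax, pvRfind_eq]
  rw [max_eq_right (pvOptInt_ge _), ← pvScan_or, ← pvScan_or, ← pvScan_or, ← pvScan_or, ← pvScan_or]
  congr 1
  apply pvScan_congr
  intro i _
  simp only [pvPairPrefix, pvQA, pvIsTerm, pvIsSep]
  rw [pvBoolTaut6]

theorem pvBScan_eq (region : List Char) (max_chars : Int) (k : Nat) :
    pvBScan region max_chars k = pvScan (pvBoundary region max_chars) k := by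
  induction k with
  | zero => rfl
  | succ k ih => simp only [pvBScan, pvScan, ih]

theorem pvLastSlice (l : List Char) (m : Nat) (hm : l.length = m + 1) :
    PySem.List.slice l (some (-1)) none = [l.getD m ' '] := by
  rw [PySem.List.slice_from_neg_one, hm]
  simp only [Nat.add_sub_cancel]
  rw [List.drop_eq_getElem_cons (by omega)]
  rw [List.drop_eq_nil_of_le (by omega), List.getD_eq_getElem _ _ (by omega)]

theorem pvKey (l : List Char) (mc : Int) (hlen : 0 ≤ mc → (l.length : Int) = mc) :
    (if mc - 1 > pvOptInt (pvScan (pvQA l) l.length) ∧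
        PySem.Chars.isIn (PySem.List.slice l (some (-1)) none) ['.', '!', '?'] = true
     then mc - 1 else pvOptInt (pvScan (pvQA l) l.length))
      = pvOptInt (pvScan (pvBoundary l mc) l.length) := by
  by_cases hE : 0 < l.length ∧ (l.length : Int) = mc ∧ pvIsTerm (l.getD (l.length - 1) ' ') = true
  · obtain ⟨hn0, hmc, hterm⟩ := hE
    obtain ⟨m, hm⟩ : ∃ m, l.length = m + 1 := ⟨l.length - 1, by omega⟩
    rw [hm] at hterm
    simp only [Nat.add_sub_cancel] at hterm
    have hb : pvBoundary l mc m = true := by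
      have : ((m : Int) + 1 == mc) = true := by
        rw [beq_iff_eq]; rw [hm] at hmc; push_cast at hmc ⊢; omega
      unfold pvBoundary
      rw [hterm, this]
      simp
    have hBs : pvScan (pvBoundary l mc) l.length = some m := by
      rw [hm]; simp [pvScan, hb]
    have hFlt : pvOptInt (pvScan (pvQA l) l.length) < mc - 1 := by
      cases hs : pvScan (pvQA l) l.length with
      | none => simp only [pvOptInt]; omega
      | some j =>
        have hQ := pvScan_some _ hs
        simp only [pvQA, Bool.and_eq_true, decide_eq_true_eq] at hQ
        simp only [pvOptInt]
        have := hQ.1.1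
        omega
    have hIn : PySem.Chars.isIn (PySem.List.slice l (some (-1)) none) ['.', '!', '?'] = true := by
      rw [pvLastSlice l m hm, pvSingletonIn, hterm]
    rw [if_pos ⟨hFlt, hIn⟩, hBs]
    simp only [pvOptInt]
    rw [hm] at hmc; push_cast at hmc ⊢; omega
  · have hcond : ¬(mc - 1 > pvOptInt (pvScan (pvQA l) l.length) ∧
        PySem.Chars.isIn (PySem.List.slice l (some (-1)) none) ['.', '!', '?'] = true) := by
      rintro ⟨h1, h2⟩
      have hge := pvOptInt_ge (pvScan (pvQA l) l.length)
      have hmc0 : 0 ≤ mc := by omega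
      have hmc := hlen hmc0
      have hn0 : 0 < l.length := by omega
      obtain ⟨m, hm⟩ : ∃ m, l.length = m + 1 := ⟨l.length - 1, by omega⟩
      rw [pvLastSlice l m hm, pvSingletonIn] at h2
      exact hE ⟨hn0, hmc, by rw [hm]; simpa using h2⟩
    rw [if_neg hcond]
    congr 1
    apply pvScan_congr
    intro i hi
    by_cases hb : (i : Int) + 1 = mc
    · have hmc := hlen (by omega)
      have hi1 : i + 1 = l.length := by omega
      have hterm : pvIsTerm (l.getD (l.length - 1) ' ') = false := by
        by_contra hc
        exact hE ⟨by omega, by omega, by simpa using hc⟩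
      have : l.length - 1 = i := by omega
      rw [this] at hterm
      unfold pvQA pvBoundary
      rw [hterm]
      simp
    · have hbeq : ((i : Int) + 1 == mc) = false := by simp [hb]
      simp only [pvQA, pvBoundary, hbeq, Bool.false_or]
      rw [Bool.and_assoc, Bool.and_left_comm]

theorem pvMain (region : List Char) (max_chars : Int)
    (hlen : 0 ≤ max_chars → (region.length : Int) = max_chars) :
    pvSentA region max_chars = pvSentB region max_chars := by
  have hdrop : pvScan (pvQA region) (region.length + 1) = pvScan (pvQA region) region.length := by
    have h : pvQA region region.length = false := by simp [pvQA]
    simp [pvScan, h]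
  unfold pvSentA pvSentB
  simp only [pvBScan_eq, pvFoldBest, hdrop, pvKey region max_chars hlen]
  cases hs : pvScan (pvBoundary region max_chars) region.length with
  | none => simp [pvOptInt]
  | some j =>
    simp only [pvOptInt]
    rw [if_pos (by omega)]
    have ht : PySem.List.slice region none (some ((j : Int) + 1)) = region.take (j + 1) := by
      rw [PySem.List.slice_to region (by omega)]
      congr 1
    rw [ht]
    by_cases hr : 1 < (PySem.Chars.rstrip (region.take (j + 1))).length
    · rw [if_pos (by exact_mod_cast hr), if_pos hr]
    · rw [if_neg (by exact_mod_cast hr), if_neg hr]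

-- ===== VERDICT (by name: the statement is the Claim_ definition above) =====
theorem truncate_to_limit_spec : Claim_equal_truncate_to_limit := by
  intro text max_chars preserve _
  unfold Spec_truncate_to_limit
  unfold truncate_to_limit truncate_to_limit_alt
  by_cases hfit : (text.toList.length : Int) ≤ max_chars
  · rw [if_pos hfit, if_pos hfit]
  · rw [if_neg hfit, if_neg hfit]
    have hlen : 0 ≤ max_chars →
        (((PySem.List.slice text.toList none (some max_chars)).length : Int)) = max_chars := by
      intro h0
      rw [PySem.List.slice_to text.toList h0, List.length_take]
      omega
    by_cases hp : preserve = "paragraph"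
    · rw [if_pos hp, if_pos hp]
      by_cases hpara :
          PySem.Chars.rfind (PySem.List.slice text.toList none (some max_chars)) ['\n', '\n'] > 0
      · rw [if_pos hpara, if_pos hpara, PySem.List.slice_to _ (le_of_lt hpara)]
      · rw [if_neg hpara, if_neg hpara]
        exact pvMain _ _ hlen
    · rw [if_neg hp, if_neg hp]
      exact pvMain _ _ hlen
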